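-- pv_equiv track=rewrite | github.com/dandritsanos/Traveling-Tournament-Problem | tabu_search.py | duplicate_indexes
-- ===== SOURCE A (Python) =====
-- def duplicate_indexes(lst):
--     """
--     Returns a sorted list of indexes of all elements that appear more than once.
--     """
--     seen = {}
--     dup_indexes = set()
--
--     for i, val in enumerate(lst):
--         if val in seen:
--             dup_indexes.add(seen[val])  # first occurrence
--             dup_indexes.add(i)          # current duplicate
--         else:
--             seen[val] = i
--
--     return sorted(dup_indexes)
-- ===== SOURCE B (Python) =====
-- def duplicate_indexes(lst):
--     """
--     Returns a sorted list of indexes of all elements that appear more than once.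
--     """
--     counts = {}
--     for v in lst:
--         counts[v] = counts.get(v, 0) + 1
--     return [i for i, v in enumerate(lst) if counts[v] > 1]
-- ===== Notes on version B (the rewrite author's own statement) =====
-- stated objective: simpler
-- what changed: Replaces A's single branchy pass maintaining a first-occurrence dict and a duplicate-index set (plus a final sort) by a two-phase count-then-filter: one pass builds a value->count dict, then a comprehension over enumerate keeps indexes whose value's count exceeds 1, already in sorted order so no sort is needed.
import Mathlib
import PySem

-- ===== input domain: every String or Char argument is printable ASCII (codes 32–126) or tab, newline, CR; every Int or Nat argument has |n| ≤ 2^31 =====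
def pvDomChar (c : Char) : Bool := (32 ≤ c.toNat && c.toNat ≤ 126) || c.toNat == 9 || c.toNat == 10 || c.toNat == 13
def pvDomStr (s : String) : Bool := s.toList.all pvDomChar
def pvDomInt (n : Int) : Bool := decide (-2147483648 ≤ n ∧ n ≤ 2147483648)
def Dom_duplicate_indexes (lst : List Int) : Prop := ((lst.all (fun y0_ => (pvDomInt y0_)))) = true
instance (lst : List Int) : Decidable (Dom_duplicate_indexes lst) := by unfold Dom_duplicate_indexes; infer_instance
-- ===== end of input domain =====

-- B replaces A's single branchy pass (first-occurrence dict + duplicate-index set + final sort)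
-- by a two-phase count-then-filter whose output is already in index order (objective: simpler).

-- ===== PORT A =====
-- one step of A's loop body: state = (seen, dup_indexes), pair = (i, val)
def dupStepA (st : PySem.Dict Int Int × PySem.Set Int) (iv : Int × Int) :
    PySem.Dict Int Int × PySem.Set Int :=
  match st.1.get? iv.2 with
  | some j => (st.1, PySem.Set.add (PySem.Set.add st.2 j) iv.1)
  | none => (st.1.insert iv.2 iv.1, st.2)

def duplicate_indexes (lst : List Int) : List Int :=
  let st := (PySem.List.enumerate lst).foldl dupStepA (PySem.Dict.empty, PySem.Set.empty)
  PySem.List.sorted st.2 (fun x => x) false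

-- ===== PORT B =====
def duplicate_indexes_alt (lst : List Int) : List Int :=
  let counts := lst.foldl (fun (d : PySem.Dict Int Int) v => d.insert v (d.getD v 0 + 1)) PySem.Dict.empty
  ((PySem.List.enumerate lst).filter (fun iv => counts.getD iv.2 0 > 1)).map (fun iv => iv.1)

-- ===== PRECONDITION & SPEC =====
def Spec_duplicate_indexes (lst : List Int) (out : List Int) : Prop := out = duplicate_indexes_alt lst
instance (lst : List Int) (out : List Int) : Decidable (Spec_duplicate_indexes lst out) := by unfold Spec_duplicate_indexes; infer_instance

-- ===== CLAIM (what is proved, stated in full; the proofs are below) =====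
def Claim_equal_duplicate_indexes : Prop := ∀ (lst : List Int), Dom_duplicate_indexes lst → Spec_duplicate_indexes lst (duplicate_indexes lst)

-- ===== LEMMAS AND PROOFS =====

-- j is (as an Int) the first index of value v in pre
def FirstOcc (pre : List Int) (v j : Int) : Prop :=
  ∃ k : Nat, k < pre.length ∧ j = (k : Int) ∧ pre.getD k 0 = v ∧ ∀ m : Nat, m < k → pre.getD m 0 ≠ v

-- x is (as an Int) an index of pre whose value occurs at least twice in pre
def DupIdx (pre : List Int) (x : Int) : Prop :=
  ∃ k : Nat, k < pre.length ∧ x = (k : Int) ∧ 2 ≤ pre.count (pre.getD k 0)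

-- loop invariant of A's pass: seen = first occurrence of each value, dups = duplicated indexes, no repeats
def InvA (pre : List Int) (st : PySem.Dict Int Int × PySem.Set Int) : Prop :=
  (∀ v j, st.1.get? v = some j ↔ FirstOcc pre v j)
  ∧ (∀ x, x ∈ st.2 ↔ DupIdx pre x)
  ∧ st.2.Nodup

lemma getD_mem (pre : List Int) (k : Nat) (hk : k < pre.length) : pre.getD k 0 ∈ pre := by
  rw [List.getD_eq_getElem _ _ hk]; exact List.getElem_mem hk

lemma getD_append_lt (l : List Int) (a : Int) (i : Nat) (h : i < l.length) :
    (l ++ [a]).getD i 0 = l.getD i 0 := List.getD_append l [a] 0 i h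

lemma getD_append_len (l : List Int) (a : Int) : (l ++ [a]).getD l.length 0 = a := by
  simp [List.getD_eq_getElem?_getD]

lemma exists_firstOcc (pre : List Int) (v : Int) (h : v ∈ pre) : ∃ j, FirstOcc pre v j := by
  classical
  have hex : ∃ k : Nat, k < pre.length ∧ pre.getD k 0 = v := by
    obtain ⟨n, hn, he⟩ := List.getElem_of_mem h
    exact ⟨n, hn, by simp [List.getD_eq_getElem?_getD, List.getElem?_eq_getElem hn, he]⟩
  exact ⟨(Nat.find hex : Nat), Nat.find hex, (Nat.find_spec hex).1, rfl, (Nat.find_spec hex).2,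
    fun m hm hv => Nat.find_min hex hm ⟨lt_trans hm (Nat.find_spec hex).1, hv⟩⟩

-- two distinct positions holding the same value give count ≥ 2
lemma two_le_count_of_two_idx (pre : List Int) (v : Int) (k k0 : Nat) (hk : k < pre.length)
    (hk0 : k0 < pre.length) (hne : k < k0) (h1 : pre.getD k 0 = v) (h2 : pre.getD k0 0 = v) :
    2 ≤ pre.count v := by
  have hsplit : pre = pre.take (k+1) ++ pre.drop (k+1) := (List.take_append_drop _ _).symm
  have h1' : v ∈ pre.take (k+1) := by
    have : (pre.take (k+1)).getD k 0 = v := by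
      rw [List.getD_eq_getElem?_getD, List.getElem?_take, if_pos (by omega),
        ← List.getD_eq_getElem?_getD, h1]
    rw [← this]; exact getD_mem _ _ (by simp; omega)
  have h2' : v ∈ pre.drop (k+1) := by
    have : (pre.drop (k+1)).getD (k0 - (k+1)) 0 = v := by
      rw [List.getD_eq_getElem?_getD, List.getElem?_drop, show k+1+(k0-(k+1)) = k0 by omega,
        ← List.getD_eq_getElem?_getD, h2]
    rw [← this]; exact getD_mem _ _ (by simp; omega)
  calc 2 = 1 + 1 := rfl
    _ ≤ (pre.take (k+1)).count v + (pre.drop (k+1)).count v := by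
        have := List.count_pos_iff.mpr h1'
        have := List.count_pos_iff.mpr h2'
        omega
    _ = pre.count v := by rw [← List.count_append, ← hsplit]

lemma firstOcc_append_of_mem (pre : List Int) (val v j : Int) (hv : v ∈ pre) :
    (FirstOcc (pre ++ [val]) v j ↔ FirstOcc pre v j) := by
  obtain ⟨n, hn, he⟩ := List.getElem_of_mem hv
  have hnd : pre.getD n 0 = v := by rw [List.getD_eq_getElem _ _ hn]; exact he
  constructor
  · rintro ⟨k, hk, hj, hval, hmin⟩
    have hkn : k ≤ n := by
      by_contra hgt
      exact hmin n (by omega) (by rw [getD_append_lt _ _ _ hn]; exact hnd)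
    have hklt : k < pre.length := by omega
    exact ⟨k, hklt, hj, by rw [← getD_append_lt pre val k hklt]; exact hval,
      fun m hm => by rw [← getD_append_lt pre val m (by omega)]; exact hmin m hm⟩
  · rintro ⟨k, hk, hj, hval, hmin⟩
    exact ⟨k, by simp; omega, hj, by rw [getD_append_lt _ _ _ hk]; exact hval,
      fun m hm => by rw [getD_append_lt _ _ _ (by omega)]; exact hmin m hm⟩

lemma firstOcc_append_of_ne (pre : List Int) (val v j : Int) (hne : v ≠ val) :
    (FirstOcc (pre ++ [val]) v j ↔ FirstOcc pre v j) := by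
  constructor
  · rintro ⟨k, hk, hj, hval, hmin⟩
    have hklt : k < pre.length := by
      rcases Nat.lt_or_ge k pre.length with h | h
      · exact h
      · exfalso; have : k = pre.length := by simp at hk; omega
        rw [this, getD_append_len] at hval; exact hne hval.symm
    exact ⟨k, hklt, hj, by rw [← getD_append_lt pre val k hklt]; exact hval,
      fun m hm => by rw [← getD_append_lt pre val m (by omega)]; exact hmin m hm⟩
  · rintro ⟨k, hk, hj, hval, hmin⟩
    exact ⟨k, by simp; omega, hj, by rw [getD_append_lt _ _ _ hk]; exact hval,
      fun m hm => by rw [getD_append_lt _ _ _ (by omega)]; exact hmin m hm⟩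

lemma firstOcc_append_new (pre : List Int) (val j : Int) (hnm : val ∉ pre) :
    (FirstOcc (pre ++ [val]) val j ↔ j = (pre.length : Int)) := by
  have hno : ∀ m : Nat, m < pre.length → pre.getD m 0 ≠ val := by
    intro m hm he
    exact hnm (he ▸ (by rw [List.getD_eq_getElem _ _ hm]; exact List.getElem_mem hm))
  constructor
  · rintro ⟨k, hk, hj, hval, hmin⟩
    have : k = pre.length := by
      by_contra hne
      have hklt : k < pre.length := by simp at hk; omega
      exact hno k hklt (by rw [← getD_append_lt pre val k hklt]; exact hval)
    omega
  · rintro rfl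
    exact ⟨pre.length, by simp, rfl, getD_append_len _ _,
      fun m hm => by rw [getD_append_lt _ _ _ hm]; exact hno m hm⟩

lemma count_append_ne (pre : List Int) (val w : Int) (h : w ≠ val) :
    (pre ++ [val]).count w = pre.count w := by
  simp [List.count_append, Ne.symm h]

lemma count_append_self (pre : List Int) (val : Int) :
    (pre ++ [val]).count val = pre.count val + 1 := by
  simp [List.count_append]

lemma invA_step (pre : List Int) (val : Int) (st : PySem.Dict Int Int × PySem.Set Int)
    (h : InvA pre st) : InvA (pre ++ [val]) (dupStepA st ((pre.length : Int), val)) := by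
  obtain ⟨hS, hD, hN⟩ := h
  unfold dupStepA
  rcases hget : st.1.get? val with _ | j
  all_goals simp only []
  · -- val not seen: val ∉ pre
    have hnm : val ∉ pre := by
      intro hmem
      obtain ⟨j, hj⟩ := exists_firstOcc pre val hmem
      rw [← hS val j] at hj
      rw [hget] at hj; simp at hj
    refine ⟨?_, ?_, hN⟩
    · intro v j
      rw [PySem.Dict.get?_insert]
      by_cases hv : v = val
      · rw [if_pos hv, hv, firstOcc_append_new pre val j hnm]
        constructor
        · intro h; simp at h; omega
        · rintro rfl; rfl
      · rw [if_neg hv, hS v j, firstOcc_append_of_ne pre val v j hv]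
    · intro x
      rw [hD x]
      constructor
      · rintro ⟨k, hk, hx, hc⟩
        refine ⟨k, by simp; omega, hx, ?_⟩
        rw [getD_append_lt _ _ _ hk]
        have hwne : pre.getD k 0 ≠ val := by
          intro he; exact hnm (he ▸ getD_mem pre k hk)
        rw [count_append_ne _ _ _ hwne]; exact hc
      · rintro ⟨k, hk, hx, hc⟩
        have hklen : k < pre.length ∨ k = pre.length := by simp at hk; omega
        rcases hklen with hklt | rfl
        · refine ⟨k, hklt, hx, ?_⟩
          rw [getD_append_lt _ _ _ hklt] at hc
          have hwne : pre.getD k 0 ≠ val := by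
            intro he; exact hnm (he ▸ getD_mem pre k hklt)
          rw [count_append_ne _ _ _ hwne] at hc; exact hc
        · exfalso
          rw [getD_append_len, count_append_self] at hc
          have : pre.count val = 0 := List.count_eq_zero.mpr hnm
          omega
  · -- val seen, first index j = k0
    obtain ⟨k0, hk0, hj0, hv0, hmin0⟩ := (hS val j).mp hget
    have hvm : val ∈ pre := hv0 ▸ getD_mem pre k0 hk0
    have hc1 : 1 ≤ pre.count val := List.count_pos_iff.mpr hvm
    refine ⟨?_, ?_, PySem.Set.nodup_add _ _ (PySem.Set.nodup_add _ _ hN)⟩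
    · intro v j'
      rw [hS v j']
      by_cases hv : v = val
      · rw [hv]; exact (firstOcc_append_of_mem pre val val j' hvm).symm
      · exact (firstOcc_append_of_ne pre val v j' hv).symm
    · intro x
      rw [PySem.Set.mem_add, PySem.Set.mem_add, hD x]
      constructor
      · rintro ((hx | rfl) | rfl)
        · obtain ⟨k, hk, hxk, hc⟩ := hx
          refine ⟨k, by simp; omega, hxk, ?_⟩
          rw [getD_append_lt _ _ _ hk]
          by_cases hw : pre.getD k 0 = val
          · rw [hw, count_append_self]; rw [hw] at hc; omega
          · rw [count_append_ne _ _ _ hw]; exact hc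
        · refine ⟨k0, by simp; omega, hj0, ?_⟩
          rw [getD_append_lt _ _ _ hk0, hv0, count_append_self]; omega
        · refine ⟨pre.length, by simp, rfl, ?_⟩
          rw [getD_append_len, count_append_self]; omega
      · rintro ⟨k, hk, hx, hc⟩
        have hklen : k < pre.length ∨ k = pre.length := by simp at hk; omega
        rcases hklen with hklt | rfl
        · rw [getD_append_lt _ _ _ hklt] at hc
          by_cases hw : pre.getD k 0 = val
          · rw [hw, count_append_self] at hc
            rcases Nat.lt_or_ge (pre.count val) 2 with hlt | hge
            · -- count = 1: k is THE occurrence of val, so k = k0 and x = j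
              left; right
              have : k = k0 := by
                by_contra hne
                rcases Nat.lt_or_ge k k0 with h1 | h1
                · have := two_le_count_of_two_idx pre val k k0 hklt hk0 h1 hw hv0; omega
                · have h1' : k0 < k := by omega
                  have := two_le_count_of_two_idx pre val k0 k hk0 hklt h1' hv0 hw; omega
              rw [hx, this, hj0]
            · left; left; exact ⟨k, hklt, hx, by rw [hw]; exact hge⟩
          · rw [count_append_ne _ _ _ hw] at hc
            left; left; exact ⟨k, hklt, hx, hc⟩
        · right; exact hx

lemma invA_foldl (lst : List Int) :
    InvA lst ((PySem.List.enumerate lst).foldl dupStepA (PySem.Dict.empty, PySem.Set.empty)) := by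
  induction lst using List.reverseRecOn with
  | nil =>
    refine ⟨?_, ?_, List.nodup_nil⟩
    · intro v j
      simp [PySem.List.enumerate, PySem.Dict.get?_empty, FirstOcc]
    · intro x
      simp [PySem.List.enumerate, DupIdx, PySem.Set.empty]
  | append_singleton xs x ih =>
    rw [PySem.List.enumerate_append, List.foldl_append]
    simpa using invA_step xs x _ ih

lemma memB (lst : List Int) (x : Int) :
    x ∈ duplicate_indexes_alt lst ↔ DupIdx lst x := by
  unfold duplicate_indexes_alt
  simp only [List.mem_map, List.mem_filter]
  constructor
  · rintro ⟨iv, ⟨hmem, hcnt⟩, rfl⟩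
    obtain ⟨k, hk, rfl⟩ := (PySem.List.mem_enumerate_iff _ _ _).mp hmem
    rw [PySem.Dict.getD_foldl_insert_add_one, PySem.Dict.getD_empty] at hcnt
    refine ⟨k, hk, by simp, ?_⟩
    simp only [List.getD_eq_getElem _ _ hk]
    simp at hcnt
    omega
  · rintro ⟨k, hk, rfl, hc⟩
    refine ⟨((k : Int), lst[k]), ⟨?_, ?_⟩, rfl⟩
    · rw [PySem.List.mem_enumerate_iff]; exact ⟨k, hk, by simp⟩
    · rw [PySem.Dict.getD_foldl_insert_add_one, PySem.Dict.getD_empty]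
      rw [List.getD_eq_getElem _ _ hk] at hc
      simp; omega

lemma pairwiseB (lst : List Int) :
    (duplicate_indexes_alt lst).Pairwise (fun a b => a < b) := by
  unfold duplicate_indexes_alt
  refine List.Pairwise.map _ (fun p q h => h) ?_
  exact (PySem.List.pairwise_lt_enumerate lst 0).filter _

-- ===== VERDICT (by name: the statement is the Claim_ definition above) =====
theorem duplicate_indexes_spec : Claim_equal_duplicate_indexes := by
  intro lst _
  unfold Spec_duplicate_indexes duplicate_indexes
  obtain ⟨_, hmem, hnd⟩ := invA_foldl lst
  have hndB : (duplicate_indexes_alt lst).Nodup :=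
    (pairwiseB lst).imp (fun h => ne_of_lt h)
  have hperm : (duplicate_indexes_alt lst).Perm
      ((PySem.List.enumerate lst).foldl dupStepA (PySem.Dict.empty, PySem.Set.empty)).2 :=
    (List.perm_ext_iff_of_nodup hndB hnd).mpr (fun a => (memB lst a).trans (hmem a).symm)
  exact PySem.List.sorted_eq_of_perm_of_pairwise_lt _ _ _ hperm (pairwiseB lst)
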